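-- pv_equiv track=rewrite | github.com/ncarsner/code-katas | use_cases/recursive_functions.py | find_outliers
-- ===== SOURCE A (Python) =====
-- def find_outliers(data, lower_bound, upper_bound):
--     """
--     Identify outliers in a list of numbers using recursion.
--
--     Args:
--     data (list): The list of numbers to check for outliers.
--     lower_bound (int): The lower bound of the acceptable range.
--     upper_bound (int): The upper bound of the acceptable range.
--
--     Returns:
--     list: A list of outliers.
--     """
--     if not data:
--         return []
--     head, *tail = data
--     if head < lower_bound or head > upper_bound:
--         return [head] + find_outliers(tail, lower_bound, upper_bound)
--     else:
--         return find_outliers(tail, lower_bound, upper_bound)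
-- ===== SOURCE B (Python) =====
-- def find_outliers(data, lower_bound, upper_bound):
--     result = []
--     for x in data:
--         if x < lower_bound or x > upper_bound:
--             result.append(x)
--     return result
-- ===== Notes on version B (the rewrite author's own statement) =====
-- stated objective: simpler
-- what changed: Replaces head/tail recursion with list concatenation by an iterative loop that appends matching elements to an accumulator.
import Mathlib
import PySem

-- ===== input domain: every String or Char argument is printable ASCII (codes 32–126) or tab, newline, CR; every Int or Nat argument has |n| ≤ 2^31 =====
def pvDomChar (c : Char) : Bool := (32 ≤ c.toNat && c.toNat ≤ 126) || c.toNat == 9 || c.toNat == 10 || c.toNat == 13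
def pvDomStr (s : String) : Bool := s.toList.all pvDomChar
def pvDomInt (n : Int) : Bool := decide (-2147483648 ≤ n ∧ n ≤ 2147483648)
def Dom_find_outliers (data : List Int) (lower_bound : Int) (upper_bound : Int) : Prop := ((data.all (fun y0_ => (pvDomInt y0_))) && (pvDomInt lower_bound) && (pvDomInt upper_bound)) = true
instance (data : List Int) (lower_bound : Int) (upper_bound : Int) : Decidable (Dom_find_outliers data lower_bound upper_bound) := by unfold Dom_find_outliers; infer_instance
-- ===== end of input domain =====

-- B replaces the head/tail recursion with an iterative accumulating loop (simpler/linear).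
-- ===== PORT A =====
def find_outliers (data : List Int) (lower_bound : Int) (upper_bound : Int) : List Int :=
  match data with
  | [] => []
  | head :: tail =>
    if head < lower_bound ∨ head > upper_bound then
      [head] ++ find_outliers tail lower_bound upper_bound
    else
      find_outliers tail lower_bound upper_bound

-- ===== PORT B =====
-- iterative loop: result starts empty, append x when out of bounds
def find_outliers_alt (data : List Int) (lower_bound : Int) (upper_bound : Int) : List Int :=
  data.foldl (fun result x =>
    if x < lower_bound ∨ x > upper_bound then result ++ [x] else result) []

-- ===== PRECONDITION & SPEC =====
def Spec_find_outliers (data : List Int) (lower_bound : Int) (upper_bound : Int) (out : List Int) : Prop := out = find_outliers_alt data lower_bound upper_bound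
instance (data : List Int) (lower_bound : Int) (upper_bound : Int) (out : List Int) : Decidable (Spec_find_outliers data lower_bound upper_bound out) := by unfold Spec_find_outliers; infer_instance

-- ===== CLAIM (what is proved, stated in full; the proofs are below) =====
def Claim_equal_find_outliers : Prop := ∀ (data : List Int) (lower_bound : Int) (upper_bound : Int), Dom_find_outliers data lower_bound upper_bound → Spec_find_outliers data lower_bound upper_bound (find_outliers data lower_bound upper_bound)

-- ===== LEMMAS AND PROOFS =====

-- ===== VERDICT (by name: the statement is the Claim_ definition above) =====
lemma alt_acc (data : List Int) (lb ub : Int) (acc : List Int) :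
    data.foldl (fun result x => if x < lb ∨ x > ub then result ++ [x] else result) acc
      = acc ++ find_outliers data lb ub := by
  induction data generalizing acc with
  | nil => simp [find_outliers]
  | cons h t ih =>
    simp only [List.foldl_cons, find_outliers]
    split_ifs with hc
    · rw [ih]; simp
    · rw [ih]

theorem find_outliers_spec : Claim_equal_find_outliers := by
  intro data lb ub _
  unfold Spec_find_outliers find_outliers_alt
  rw [alt_acc]
  simp
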